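-- pv_equiv track=rewrite | github.com/Onnis-Lab/MatchingFigures | network/network_utils.py | cal_wait
-- ===== SOURCE A (Python) =====
-- def cal_wait(all_participants, id, all_start_at_round_one=True):
--     '''
--     inputs:
--         all_participants: lists of sets, participants of every round;
--         id: participant id.
--     returns:
--         int, maximum number of rounds that any participant has to wait between games;
--         int, maximum total number of rounds that any participant has to wait between games.'''
--
--     n_wait = 0
--     max_wait = 0
--     total_wait = 0
--     round_played = 0
--     for round_part in all_participants:
--         if round_played == 4:
--             break
--         if id in round_part:
--             n_wait = 0
--             round_played += 1
--         elif not all_start_at_round_one and round_played == 0: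
--             continue
--         else:
--             total_wait += 1
--             n_wait += 1
--         if n_wait > max_wait:
--             max_wait = n_wait
--     return max_wait, total_wait
-- ===== SOURCE B (Python) =====
-- def cal_wait(all_participants, id, all_start_at_round_one=True):
--     # Closed-form reformulation: find the (at most first four) rounds the
--     # participant plays in, derive the counted region [start, end] from them,
--     # and read total/max waits off the gaps between consecutive play indices.
--     plays = [i for i, round_part in enumerate(all_participants) if id in round_part][:4]
--     if all_start_at_round_one:
--         start = 0
--     elif plays:
--         start = plays[0]
--     else:
--         return 0, 0
--     end = plays[-1] if len(plays) == 4 else len(all_participants) - 1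
--     total_wait = (end - start + 1) - len(plays)
--     if plays:
--         gaps = [plays[0] - start] + [b - a - 1 for a, b in zip(plays, plays[1:])] + [end - plays[-1]]
--         max_wait = max(gaps)
--     else:
--         max_wait = max(0, end - start + 1)
--     return max_wait, total_wait
-- ===== Notes on version B (the rewrite author's own statement) =====
-- stated objective: alternative
-- what changed: Replaces A's single stateful streaming loop (run counter, break after 4 plays, skip/continue phase) by a closed-form computation: collect the first four play indices once, derive the counted region's start and end from them, and obtain total_wait and max_wait arithmetically from the index gaps.
import Mathlib
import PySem

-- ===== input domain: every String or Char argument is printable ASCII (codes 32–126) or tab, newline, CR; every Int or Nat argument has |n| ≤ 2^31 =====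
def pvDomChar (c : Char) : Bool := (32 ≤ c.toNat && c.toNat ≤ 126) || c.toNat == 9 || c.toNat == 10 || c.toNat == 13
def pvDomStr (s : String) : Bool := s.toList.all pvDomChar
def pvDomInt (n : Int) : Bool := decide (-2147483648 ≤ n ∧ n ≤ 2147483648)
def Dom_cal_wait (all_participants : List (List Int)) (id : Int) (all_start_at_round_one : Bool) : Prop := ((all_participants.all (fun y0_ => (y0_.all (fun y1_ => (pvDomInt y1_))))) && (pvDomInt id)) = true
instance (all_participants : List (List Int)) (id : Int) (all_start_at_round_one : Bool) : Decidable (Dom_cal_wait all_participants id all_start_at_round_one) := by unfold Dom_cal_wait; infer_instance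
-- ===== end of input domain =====

-- B replaces A's streaming loop by a closed-form computation from the first four play
-- indices (objective: alternative, same behaviour, proved equal on all inputs).

-- ===== PORT A =====
-- the for-loop of A: state (n_wait, max_wait, total_wait, round_played), break at 4 plays
def cal_wait_loop (id : Int) (flag : Bool) : List (List Int) → Int → Int → Int → Int → Int × Int
  | [], _n, mw, tw, _rp => (mw, tw)
  | round_part :: rest, n, mw, tw, rp =>
    if rp = 4 then (mw, tw)
    else if round_part.contains id then
      cal_wait_loop id flag rest 0 (if (0:Int) > mw then 0 else mw) tw (rp + 1)
    else if !flag && rp = 0 then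
      cal_wait_loop id flag rest n mw tw rp
    else
      cal_wait_loop id flag rest (n+1) (if n+1 > mw then n+1 else mw) (tw+1) rp

def cal_wait (all_participants : List (List Int)) (id : Int) (all_start_at_round_one : Bool) : Int × Int :=
  cal_wait_loop id all_start_at_round_one all_participants 0 0 0 0

-- ===== PORT B =====
def cal_wait_alt (all_participants : List (List Int)) (id : Int) (all_start_at_round_one : Bool) : Int × Int :=
  let plays : List Int :=
    (((PySem.List.enumerate all_participants 0).filter (fun p => p.2.contains id)).map (fun p => p.1)).take 4
  let start? : Option Int := if all_start_at_round_one then some 0 else plays.head?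
  match start? with
  | none => (0, 0)  -- "return 0, 0": flag off and no plays
  | some start =>
    -- plays[-1]: getLastD's default is never used (guarded by len(plays) == 4 / plays nonempty)
    let e : Int := if plays.length = 4 then plays.getLastD 0 else (all_participants.length : Int) - 1
    let total_wait : Int := (e - start + 1) - (plays.length : Int)
    let max_wait : Int :=
      match plays with
      | [] => max 0 (e - start + 1)
      | p0 :: _ =>
        let gaps : List Int :=
          (p0 - start) :: ((plays.zip plays.tail).map (fun ab => ab.2 - ab.1 - 1)) ++ [e - plays.getLastD 0]
        (PySem.List.max? gaps (fun x => x)).getD 0   -- max(gaps); gaps is nonempty so getD 0 is never used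
    (max_wait, total_wait)

-- ===== PRECONDITION & SPEC =====
def Spec_cal_wait (all_participants : List (List Int)) (id : Int) (all_start_at_round_one : Bool) (out : Int × Int) : Prop := out = cal_wait_alt all_participants id all_start_at_round_one
instance (all_participants : List (List Int)) (id : Int) (all_start_at_round_one : Bool) (out : Int × Int) : Decidable (Spec_cal_wait all_participants id all_start_at_round_one out) := by unfold Spec_cal_wait; infer_instance

-- ===== CLAIM (what is proved, stated in full; the proofs are below) =====
def Claim_equal_cal_wait : Prop := ∀ (all_participants : List (List Int)) (id : Int) (all_start_at_round_one : Bool), Dom_cal_wait all_participants id all_start_at_round_one → Spec_cal_wait all_participants id all_start_at_round_one (cal_wait all_participants id all_start_at_round_one)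

-- ===== LEMMAS AND PROOFS =====

-- Everything depends on each round only through "does the participant play", so we work
-- over the list of Booleans pvFlags and mirror both ports there.
def pvFlags (id : Int) (aps : List (List Int)) : List Bool := aps.map (fun r => r.contains id)

-- A's loop over flags
def pvGoA (flag : Bool) : List Bool → Int → Int → Int → Int → Int × Int
  | [], _n, mw, tw, _rp => (mw, tw)
  | c :: rest, n, mw, tw, rp =>
    if rp = 4 then (mw, tw)
    else if c then
      pvGoA flag rest 0 (if (0:Int) > mw then 0 else mw) tw (rp + 1)
    else if !flag && rp = 0 then
      pvGoA flag rest n mw tw rp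
    else
      pvGoA flag rest (n+1) (if n+1 > mw then n+1 else mw) (tw+1) rp

-- indices (from c) of the true entries
def pvIdx (c : Int) : List Bool → List Int
  | [] => []
  | true :: r => c :: pvIdx (c+1) r
  | false :: r => pvIdx (c+1) r

-- prefix up to and including the k-th true (all of bs if fewer trues)
def pvCut : List Bool → Nat → List Bool
  | _, 0 => []
  | [], _ + 1 => []
  | true :: r, k+1 => true :: pvCut r k
  | false :: r, k+1 => false :: pvCut r (k+1)

-- longest run of falses, current run n; sup of the run counter over all wait steps
def pvMrun : List Bool → Int → Int
  | [], _ => 0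
  | true :: r, _ => pvMrun r 0
  | false :: r, n => max (n+1) (pvMrun r (n+1))

-- B's region end, relative to remaining suffix bs starting at absolute position c
def pvFin (c : Int) (k : Nat) (bs : List Bool) : Int :=
  let Q := (pvIdx c bs).take k
  if Q.length = k then Q.getLastD 0 else c + (bs.length : Int) - 1

def pvDiffs (Q : List Int) : List Int := (Q.zip Q.tail).map (fun ab => ab.2 - ab.1 - 1)

-- B's max-gap computation, generalized by a pending run n
def pvMgl (c : Int) (k : Nat) (bs : List Bool) (n : Int) : Int :=
  match (pvIdx c bs).take k with
  | [] => max n (pvFin c k bs - c + 1 + n)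
  | p0 :: t => ((p0 - c + n) :: pvDiffs (p0 :: t) ++ [pvFin c k bs - (p0 :: t).getLastD 0]).foldl max n

-- - bridges -
theorem pv_loop_eq_goA (id : Int) (flag : Bool) : ∀ (aps : List (List Int)) (n mw tw rp : Int),
    cal_wait_loop id flag aps n mw tw rp = pvGoA flag (pvFlags id aps) n mw tw rp := by
  intro aps
  induction aps with
  | nil => intro n mw tw rp; rfl
  | cons r rest ih =>
    intro n mw tw rp
    simp only [cal_wait_loop, pvGoA, pvFlags, List.map_cons]
    split_ifs <;> simp_all [pvFlags]

theorem pv_enum_eq_idx (id : Int) : ∀ (aps : List (List Int)) (c : Int),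
    (((PySem.List.enumerate aps c).filter (fun p => p.2.contains id)).map (fun p => p.1))
      = pvIdx c (pvFlags id aps) := by
  intro aps
  induction aps with
  | nil => intro c; rfl
  | cons r rest ih =>
    intro c
    rw [PySem.List.enumerate_cons]
    by_cases h : id ∈ r <;>
    · have ih' := ih (c+1)
      simp [pvFlags, List.filter_cons, h, pvIdx] at ih' ⊢
      exact ih'

-- - small facts -
theorem pv_foldl_max_max (l : List Int) : ∀ a b : Int, l.foldl max (max a b) = max a (l.foldl max b) := by
  induction l with
  | nil => intro a b; rfl
  | cons x t ih =>
    intro a b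
    simp only [List.foldl_cons]
    rw [max_assoc, ih]

theorem pv_idx_ge : ∀ (bs : List Bool) (c x : Int), x ∈ pvIdx c bs → c ≤ x := by
  intro bs
  induction bs with
  | nil => intro c x h; simp [pvIdx] at h
  | cons b r ih =>
    intro c x h
    cases b
    · simp only [pvIdx] at h
      have := ih (c+1) x h; omega
    · simp only [pvIdx, List.mem_cons] at h
      rcases h with rfl | h
      · omega
      · have := ih (c+1) x h; omega

theorem pv_mrun_nonneg : ∀ (bs : List Bool) (n : Int), 0 ≤ n → 0 ≤ pvMrun bs n := by
  intro bs
  induction bs with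
  | nil => intro n _; simp [pvMrun]
  | cons b r ih =>
    intro n hn
    cases b
    · simp only [pvMrun]
      have := le_max_left (n+1) (pvMrun r (n+1)); omega
    · simpa [pvMrun] using ih 0 le_rfl

theorem pv_mrun_allfalse : ∀ (bs : List Bool) (c n : Int), pvIdx c bs = [] → 0 ≤ n →
    max n (pvMrun bs n) = n + bs.length := by
  intro bs
  induction bs with
  | nil => intro c n _ hn; simp [pvMrun, max_eq_left hn]
  | cons b r ih =>
    intro c n h hn
    cases b
    · simp only [pvIdx] at h
      simp only [pvMrun, List.length_cons]
      rw [← max_assoc, max_eq_right (by omega : n ≤ n + 1), ih (c+1) (n+1) h (by omega)]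
      push_cast; ring
    · simp [pvIdx] at h

theorem pv_cut_allfalse : ∀ (bs : List Bool) (c : Int) (k : Nat), pvIdx c bs = [] →
    pvCut bs (k+1) = bs := by
  intro bs
  induction bs with
  | nil => intro c k _; rfl
  | cons b r ih =>
    intro c k h
    cases b
    · simp only [pvIdx] at h
      simp [pvCut, ih (c+1) k h]
    · simp [pvIdx] at h

theorem pv_getLastD_ne_nil {l : List Int} (h : l ≠ []) (a b : Int) : l.getLastD a = l.getLastD b := by
  cases l with
  | nil => simp at h
  | cons x t => rw [List.getLastD_cons, List.getLastD_cons]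

-- - the two closed forms of B's arithmetic -
theorem pv_count_closed : ∀ (bs : List Bool) (c : Int) (k : Nat), 1 ≤ k →
    ((pvCut bs k).count false : Int)
      = pvFin c k bs - c + 1 - (((pvIdx c bs).take k).length : Int) := by
  intro bs
  induction bs with
  | nil =>
    intro c k hk
    rcases k with _ | m
    · omega
    · simp only [pvCut, pvIdx, pvFin, List.take_nil, List.length_nil, List.count_nil]
      rw [if_neg (by omega)]
      push_cast; ring
  | cons x r ih =>
    intro c k hk
    rcases k with _ | m
    · omega
    cases x
    · -- false head
      have IH := ih (c+1) (m+1) (by omega)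
      have hfin : pvFin c (m+1) (false :: r) = pvFin (c+1) (m+1) r := by
        simp only [pvFin, pvIdx, List.length_cons]
        split_ifs with h1
        · rfl
        · push_cast; ring
      have hc : (pvCut (false :: r) (m+1)).count false
          = (pvCut r (m+1)).count false + 1 := by simp [pvCut]
      rw [hc, show (pvIdx c (false :: r)) = pvIdx (c+1) r from rfl]
      push_cast
      push_cast at IH
      omega
    · -- true head
      rcases m with _ | m'
      · -- k = 1
        simp [pvCut, pvIdx, pvFin, List.take_succ_cons]
      · have IH := ih (c+1) (m'+1) (by omega)
        have hfin : pvFin c (m'+1+1) (true :: r) = pvFin (c+1) (m'+1) r := by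
          by_cases hfull : ((pvIdx (c+1) r).take (m'+1)).length = m'+1
          · have hne : (pvIdx (c+1) r).take (m'+1) ≠ [] := by
              intro h0; rw [h0] at hfull; simp at hfull
            simp only [pvFin, pvIdx, List.take_succ_cons, List.length_cons]
            rw [if_pos (by omega), if_pos hfull, List.getLastD_cons,
              pv_getLastD_ne_nil hne c 0]
          · simp only [pvFin, pvIdx, List.take_succ_cons, List.length_cons]
            rw [if_neg (fun hh => hfull (by omega)), if_neg hfull]
            push_cast; ring
        have hc : (pvCut (true :: r) (m'+1+1)).count false
            = (pvCut r (m'+1)).count false := by simp [pvCut]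
        rw [hc, show (pvIdx c (true :: r)) = c :: pvIdx (c+1) r from rfl,
          List.take_succ_cons, List.length_cons]
        push_cast
        push_cast at IH
        omega

theorem pvDiffs_single (x : Int) : pvDiffs [x] = [] := rfl

theorem pvDiffs_cons₂ (a b : Int) (t : List Int) :
    pvDiffs (a :: b :: t) = (b - a - 1) :: pvDiffs (b :: t) := rfl

theorem pv_getLastD_cons₂ (a b : Int) (t : List Int) (d : Int) :
    (a :: b :: t).getLastD d = (b :: t).getLastD d := by
  rw [List.getLastD_cons]
  exact pv_getLastD_ne_nil (by simp) a d

theorem pv_max_closed : ∀ (bs : List Bool) (c : Int) (k : Nat) (n : Int), 1 ≤ k → 0 ≤ n →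
    pvMgl c k bs n = max n (pvMrun (pvCut bs k) n) := by
  intro bs
  induction bs with
  | nil =>
    intro c k n hk hn
    rcases k with _ | m
    · omega
    · simp only [pvMgl, pvIdx, List.take_nil, pvFin, List.length_nil]
      rw [if_neg (by omega)]
      have hcut : pvMrun (pvCut [] (m+1)) n = 0 := rfl
      rw [hcut]
      omega
  | cons x r ih =>
    intro c k n hk hn
    rcases k with _ | m
    · omega
    cases x
    · -- false head
      have hfin : pvFin c (m+1) (false :: r) = pvFin (c+1) (m+1) r := by
        simp only [pvFin, pvIdx, List.length_cons]
        split_ifs with h1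
        · rfl
        · push_cast; ring
      have hmr : pvMrun (pvCut (false :: r) (m+1)) n
          = max (n+1) (pvMrun (pvCut r (m+1)) (n+1)) := by simp [pvCut, pvMrun]
      have IH := ih (c+1) (m+1) (n+1) (by omega) (by omega)
      have hnn := pv_mrun_nonneg (pvCut r (m+1)) (n+1) (by omega)
      cases hT : (pvIdx (c+1) r).take (m+1) with
      | nil =>
        have hF : pvFin (c+1) (m+1) r = c + 1 + (r.length : ℤ) - 1 := by
          simp only [pvFin, hT, List.length_nil]
          rw [if_neg (by omega)]
        simp only [pvMgl, pvIdx, hT] at IH ⊢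
        rw [hmr, hfin, hF]
        rw [hF] at IH
        omega
      | cons q1 t' =>
        have hq1 : c + 1 ≤ q1 :=
          pv_idx_ge r (c+1) q1 (List.take_subset _ _ (by rw [hT]; simp))
        simp only [pvMgl, pvIdx, hT, List.cons_append, List.foldl_cons] at IH ⊢
        rw [hmr, hfin]
        rw [show max n (q1 - c + n) = max (n+1) (q1 - (c+1) + (n+1)) from by omega]
        rw [IH]
        omega
    · -- true head
      have hQ : (pvIdx c (true :: r)).take (m+1) = c :: (pvIdx (c+1) r).take m := by
        simp [pvIdx, List.take_succ_cons]
      rcases m with _ | m''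
      · -- k = 1
        have hL : pvMgl c 1 (true :: r) n = max (max n (c - c + n)) (c - c) := rfl
        have hz : pvMrun (pvCut (true :: r) 1) n = 0 := by
          first
          | rfl
          | simp [pvCut, pvMrun]
          | (show pvMrun (pvCut (true :: r) (Nat.succ 0)) n = 0; rfl)
        rw [hL, hz]
        omega
      · have hmr : pvMrun (pvCut (true :: r) (m''+1+1)) n = pvMrun (pvCut r (m''+1)) 0 := rfl
        cases hT : (pvIdx (c+1) r).take (m''+1) with
        | nil =>
          have hidx : pvIdx (c+1) r = [] := by
            rcases List.take_eq_nil_iff.mp hT with h | h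
            · exact absurd h (by omega)
            · exact h
          have hcut : pvCut r (m''+1) = r := pv_cut_allfalse r (c+1) m'' hidx
          have hmrv : pvMrun r 0 = (r.length : ℤ) := by
            have h1 := pv_mrun_allfalse r (c+1) 0 hidx le_rfl
            have h2 := pv_mrun_nonneg r 0 le_rfl
            omega
          have hF : pvFin c (m''+1+1) (true :: r) = c + 1 + (r.length : ℤ) - 1 := by
            simp only [pvFin, hQ, hT, List.length_cons, List.length_nil]
            rw [if_neg (by omega)]
            push_cast; ring
          simp only [pvMgl, hQ, hT, pvDiffs_single, List.cons_append, List.nil_append,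
            List.foldl_cons, List.foldl_nil]
          rw [hmr, hcut, hmrv, hF,
            show (([c] : List Int)).getLastD 0 = c from rfl]
          omega
        | cons q1 t' =>
          have hfin : pvFin c (m''+1+1) (true :: r) = pvFin (c+1) (m''+1) r := by
            simp only [pvFin, hQ, hT, List.length_cons]
            by_cases hc1 : t'.length + 1 = m''+1
            · rw [if_pos (by omega), if_pos hc1, pv_getLastD_cons₂]
            · rw [if_neg (by omega), if_neg hc1]
              push_cast; ring
          have hq1 : c + 1 ≤ q1 :=
            pv_idx_ge r (c+1) q1 (List.take_subset _ _ (by rw [hT]; simp))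
          have IH := ih (c+1) (m''+1) 0 (by omega) le_rfl
          have hnn := pv_mrun_nonneg (pvCut r (m''+1)) 0 le_rfl
          simp only [pvMgl, hQ, hT, pvDiffs_cons₂, pv_getLastD_cons₂, List.cons_append,
            List.foldl_cons] at IH ⊢
          rw [hmr, hfin]
          rw [show max (max n (c - c + n)) (q1 - c - 1)
              = max n (max 0 (q1 - (c+1) + 0)) from by omega]
          rw [pv_foldl_max_max]
          rw [IH]
          omega

-- - A's closed form -
theorem pv_goA_active (flag : Bool) : ∀ (bs : List Bool) (b : Nat) (n mw tw : Int), b ≤ 4 →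
    0 ≤ n → 0 ≤ mw → (flag = true ∨ b < 4) →
    pvGoA flag bs n mw tw (4 - (b : Int))
      = (max mw (pvMrun (pvCut bs b) n), tw + ((pvCut bs b).count false : Int)) := by
  intro bs
  induction bs with
  | nil =>
    intro b n mw tw hb hn hm hf
    rcases b with _ | k <;> simp [pvGoA, pvCut, pvMrun] <;> omega
  | cons c r ih =>
    intro b n mw tw hb hn hm hf
    rcases b with _ | k
    · simp [pvGoA, pvCut, pvMrun]; omega
    · have hrp : ¬((4:ℤ) - ((k+1 : ℕ) : ℤ) = 4) := by push_cast; omega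
      cases c
      · -- wait round
        simp only [pvGoA, if_neg hrp, Bool.false_eq_true, if_false]
        rw [show (if n+1 > mw then n+1 else mw) = max mw (n+1) from by omega]
        split_ifs with h2
        · -- the skip branch cannot fire here
          exfalso
          simp only [Bool.and_eq_true, Bool.not_eq_true', decide_eq_true_eq] at h2
          rcases hf with hf | hf
          · rw [hf] at h2; simp at h2
          · push_cast at h2; omega
        · rw [ih (k+1) (n+1) (max mw (n+1)) (tw+1) hb (by omega) (by omega) hf]
          have hc : (pvCut (false :: r) (k+1)).count false
              = (pvCut r (k+1)).count false + 1 := by simp [pvCut]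
          have hm2 : pvMrun (pvCut (false :: r) (k+1)) n
              = max (n+1) (pvMrun (pvCut r (k+1)) (n+1)) := by simp [pvCut, pvMrun]
          rw [Prod.mk.injEq]
          refine ⟨by rw [hm2]; omega, by rw [hc]; push_cast; omega⟩
      · -- play round
        simp only [pvGoA, if_neg hrp, eq_self_iff_true, if_true]
        have harg : (4:ℤ) - ((k+1 : ℕ) : ℤ) + 1 = 4 - (k : ℤ) := by push_cast; ring
        rw [show (if (0:ℤ) > mw then 0 else mw) = mw from by omega]
        rw [harg, ih k 0 mw tw (by omega) le_rfl hm (Or.inr (by omega))]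
        have hc : (pvCut (true :: r) (k+1)).count false
            = (pvCut r k).count false := by simp [pvCut]
        have hm2 : pvMrun (pvCut (true :: r) (k+1)) n = pvMrun (pvCut r k) 0 := by
          simp [pvCut, pvMrun]
        rw [Prod.mk.injEq]
        exact ⟨by rw [hm2], by rw [hc]⟩

theorem pv_goA_skip : ∀ (bs : List Bool), pvGoA false bs 0 0 0 0 =
    pvGoA false (bs.dropWhile (fun x => !x)) 0 0 0 0 := by
  intro bs
  induction bs with
  | nil => rfl
  | cons b r ih =>
    cases b
    · simpa [pvGoA, List.dropWhile] using ih
    · simp [List.dropWhile]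

theorem pv_dropWhile_head : ∀ (bs r : List Bool) (b : Bool),
    bs.dropWhile (fun x => !x) = b :: r → b = true := by
  intro bs
  induction bs with
  | nil => intro r b h; simp at h
  | cons x t ih =>
    intro r b h
    cases x
    · exact ih r b (by simpa [List.dropWhile] using h)
    · simp only [List.dropWhile, Bool.not_true] at h
      injection h with h1 _
      exact h1.symm

theorem pv_idx_dropWhile : ∀ (bs r : List Bool) (c : Int), bs.dropWhile (fun x => !x) = true :: r →
    pvIdx c bs = (c + ((bs.takeWhile (fun x => !x)).length : Int))
      :: pvIdx (c + ((bs.takeWhile (fun x => !x)).length : Int) + 1) r := by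
  intro bs
  induction bs with
  | nil => intro r c h; simp at h
  | cons x t ih =>
    intro r c h
    cases x
    · simp only [List.dropWhile, Bool.not_false] at h
      have H := ih r (c+1) h
      simp only [pvIdx, List.takeWhile, Bool.not_false, List.length_cons, H, List.cons.injEq]
      refine ⟨by push_cast; ring, ?_⟩
      congr 1
      push_cast; ring
    · simp only [List.dropWhile, Bool.not_true] at h
      injection h with _ h2
      subst h2
      simp [pvIdx, List.takeWhile]

theorem pv_idx_nil_of_dropWhile_nil : ∀ (bs : List Bool) (c : Int),
    bs.dropWhile (fun x => !x) = [] → pvIdx c bs = [] := by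
  intro bs
  induction bs with
  | nil => intro c _; rfl
  | cons x t ih =>
    intro c h
    cases x
    · simp only [List.dropWhile] at h
      simpa [pvIdx] using ih (c+1) (by simpa using h)
    · simp [List.dropWhile] at h

-- B's computation, mirrored on the flag list (L stands for the round count)
def pvAltB (bs : List Bool) (L : Int) (flag : Bool) : Int × Int :=
  let plays : List Int := (pvIdx 0 bs).take 4
  match (if flag then some 0 else plays.head? : Option Int) with
  | none => (0, 0)
  | some start =>
    let e : Int := if plays.length = 4 then plays.getLastD 0 else L - 1
    let total_wait : Int := (e - start + 1) - (plays.length : Int)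
    let max_wait : Int :=
      match plays with
      | [] => max 0 (e - start + 1)
      | p0 :: _ =>
        let gaps : List Int :=
          (p0 - start) :: ((plays.zip plays.tail).map (fun ab => ab.2 - ab.1 - 1)) ++ [e - plays.getLastD 0]
        (PySem.List.max? gaps (fun x => x)).getD 0
    (max_wait, total_wait)

theorem pv_alt_eq (aps : List (List Int)) (id : Int) (flag : Bool) :
    cal_wait_alt aps id flag = pvAltB (pvFlags id aps) (aps.length : Int) flag := by
  unfold cal_wait_alt pvAltB
  rw [pv_enum_eq_idx id aps 0]

theorem pv_core (bs : List Bool) (flag : Bool) :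
    pvGoA flag bs 0 0 0 0 = pvAltB bs (bs.length : Int) flag := by
  cases flag
  · -- flag = false
    rw [pv_goA_skip]
    cases hd : bs.dropWhile (fun x => !x) with
    | nil =>
      have hidx : pvIdx 0 bs = [] := pv_idx_nil_of_dropWhile_nil bs 0 hd
      simp [pvAltB, hidx, pvGoA]
    | cons b r =>
      have hb := pv_dropWhile_head bs r b hd
      subst hb
      obtain ⟨d, hidx, hlen2⟩ :
          ∃ d : ℤ, pvIdx 0 bs = d :: pvIdx (d+1) r ∧
            (bs.length : ℤ) = d + 1 + (r.length : ℤ) := by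
        refine ⟨0 + ((bs.takeWhile (fun x => !x)).length : ℤ),
          pv_idx_dropWhile bs r 0 hd, ?_⟩
        have hsplit := congrArg List.length
          (List.takeWhile_append_dropWhile (p := fun x => !x) (l := bs))
        rw [hd] at hsplit
        simp only [List.length_append, List.length_cons] at hsplit
        push_cast
        omega
      have hstep : pvGoA false (true :: r) 0 0 0 0 = pvGoA false r 0 0 0 1 := by
        norm_num [pvGoA]
      have HA := pv_goA_active false r 3 0 0 0 (by norm_num) le_rfl le_rfl
        (Or.inr (by norm_num))
      norm_num at HA
      rw [hstep, HA]
      have hcnt := pv_count_closed r (d+1) 3 (by norm_num)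
      simp only [pvAltB, hidx, List.take_succ_cons, List.head?_cons, Bool.false_eq_true,
        if_false, List.length_cons]
      have he : (if ((pvIdx (d+1) r).take 3).length + 1 = 4
            then (d :: (pvIdx (d+1) r).take 3).getLastD 0 else (bs.length : ℤ) - 1)
          = pvFin (d+1) 3 r := by
        by_cases hc : ((pvIdx (d+1) r).take 3).length = 3
        · have hne : (pvIdx (d+1) r).take 3 ≠ [] := by
            intro h0; rw [h0] at hc; simp at hc
          rw [if_pos (by omega), List.getLastD_cons, pv_getLastD_ne_nil hne d 0]
          simp only [pvFin]
          rw [if_pos hc]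
        · rw [if_neg (by omega)]
          simp only [pvFin]
          rw [if_neg hc]
          omega
      rw [he, Prod.mk.injEq]
      constructor
      · -- max component
        cases hT : (pvIdx (d+1) r).take 3 with
        | nil =>
          have hidx2 : pvIdx (d+1) r = [] := by
            rcases List.take_eq_nil_iff.mp hT with h | h
            · exact absurd h (by omega)
            · exact h
          have hcut : pvCut r 3 = r := pv_cut_allfalse r (d+1) 2 hidx2
          have hmv : pvMrun r 0 = (r.length : ℤ) := by
            have h1 := pv_mrun_allfalse r (d+1) 0 hidx2 le_rfl
            have h2 := pv_mrun_nonneg r 0 le_rfl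
            omega
          have hF : pvFin (d+1) 3 r = d + 1 + (r.length : ℤ) - 1 := by
            simp only [pvFin, hT, List.length_nil]
            rw [if_neg (by omega)]
          simp only [hT, List.tail_cons, List.zip_nil_right, List.map_nil,
            List.cons_append, List.nil_append, PySem.List.max?_id_cons, Option.getD_some,
            List.foldl_cons, List.foldl_nil, List.getLastD_cons, List.getLastD_nil]
          rw [hcut, hmv, hF]
          omega
        | cons q1 t' =>
          have HM := pv_max_closed r (d+1) 3 0 (by norm_num) le_rfl
          simp only [pvMgl, hT, pvDiffs, List.tail_cons, List.cons_append,
            List.foldl_cons] at HM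
          have hq1 : d + 1 ≤ q1 :=
            pv_idx_ge r (d+1) q1 (List.take_subset _ _ (by rw [hT]; simp))
          simp only [hT, List.tail_cons, List.zip_cons_cons, List.map_cons,
            pv_getLastD_cons₂, List.cons_append, PySem.List.max?_id_cons,
            Option.getD_some, List.foldl_cons]
          rw [show max (d - d) (q1 - d - 1) = max 0 (q1 - (d+1) + 0) from by omega]
          rw [HM]
      · -- total component
        push_cast at hcnt ⊢
        omega
  · -- flag = true
    have HA := pv_goA_active true bs 4 0 0 0 le_rfl le_rfl le_rfl (Or.inl rfl)
    norm_num at HA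
    rw [HA]
    cases hp : (pvIdx 0 bs).take 4 with
    | nil =>
      have hidx : pvIdx 0 bs = [] := by
        rcases List.take_eq_nil_iff.mp hp with h | h
        · exact absurd h (by omega)
        · exact h
      have hcut : pvCut bs 4 = bs := pv_cut_allfalse bs 0 3 hidx
      have hmv : pvMrun bs 0 = (bs.length : ℤ) := by
        have h1 := pv_mrun_allfalse bs 0 0 hidx le_rfl
        have h2 := pv_mrun_nonneg bs 0 le_rfl
        omega
      have hcnt := pv_count_closed bs 0 4 (by norm_num)
      have hF : pvFin 0 4 bs = 0 + (bs.length : ℤ) - 1 := by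
        simp only [pvFin, hp, List.length_nil]
        rw [if_neg (by omega)]
      rw [hp] at hcnt
      simp only [List.length_nil] at hcnt
      simp only [pvAltB, hp, eq_self_iff_true, if_true, List.length_nil]
      rw [hcut, hmv, Prod.mk.injEq]
      constructor
      · rw [if_neg (by omega)]
        omega
      · rw [hcut] at hcnt
        rw [if_neg (by omega)]
        push_cast at hcnt ⊢
        omega
    | cons p0 t =>
      have he : (if (p0 :: t).length = 4 then (p0 :: t).getLastD 0 else (bs.length : ℤ) - 1)
          = pvFin 0 4 bs := by
        simp only [pvFin, hp]
        split_ifs with hc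
        · rfl
        · omega
      have hp0 : (0:ℤ) ≤ p0 :=
        pv_idx_ge bs 0 p0 (List.take_subset _ _ (by rw [hp]; simp))
      have HM := pv_max_closed bs 0 4 0 (by norm_num) le_rfl
      simp only [pvMgl, hp, pvDiffs, List.tail_cons, List.cons_append,
        List.foldl_cons] at HM
      have hcnt := pv_count_closed bs 0 4 (by norm_num)
      rw [hp] at hcnt
      simp only [pvAltB, hp, eq_self_iff_true, if_true, List.tail_cons,
        PySem.List.max?_id_cons, Option.getD_some, List.cons_append, List.foldl_cons]
      rw [he, Prod.mk.injEq]
      constructor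
      · rw [show (p0 - (0:ℤ)) = max 0 (p0 - 0 + 0) from by omega]
        rw [HM]
      · push_cast at hcnt ⊢
        omega

theorem pv_main (aps : List (List Int)) (id : Int) (flag : Bool) :
    cal_wait aps id flag = cal_wait_alt aps id flag := by
  rw [pv_alt_eq]
  unfold cal_wait
  rw [pv_loop_eq_goA]
  have hlen : ((pvFlags id aps).length : ℤ) = (aps.length : ℤ) := by simp [pvFlags]
  rw [← hlen]
  exact pv_core (pvFlags id aps) flag

-- ===== VERDICT (by name: the statement is the Claim_ definition above) =====
theorem cal_wait_spec : Claim_equal_cal_wait := by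
  intro aps id flag _dom
  unfold Spec_cal_wait
  exact pv_main aps id flag
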